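-- pv_equiv track=rewrite | github.com/geethu5166/maya-mvp | dashboard/app.py | get_stats
-- ===== SOURCE A (Python) =====
-- def get_stats(attacks):
--     total = len(attacks)
--     critical = len([a for a in attacks if a.get('severity') == 'CRITICAL'])
--     high = len([a for a in attacks if a.get('severity') == 'HIGH'])
--     ssh = len([a for a in attacks if a.get('honeypot') == 'SSH'])
--     web = len([a for a in attacks if a.get('honeypot') == 'WEB'])
--     unique_ips = len(set(a.get('attacker_ip', '') for a in attacks))
--     return {
--         'total': total,
--         'critical': critical,
--         'high': high,
--         'ssh': ssh,
--         'web': web,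
--         'unique_ips': unique_ips,
--         'medium': len([a for a in attacks if a.get('severity') == 'MEDIUM']),
--         'low': len([a for a in attacks if a.get('severity') == 'LOW'])
--     }
-- ===== SOURCE B (Python) =====
-- def get_stats(attacks):
--     sev = {}
--     hp = {}
--     ips = set()
--     for a in attacks:
--         s = a.get('severity')
--         sev[s] = sev.get(s, 0) + 1
--         h = a.get('honeypot')
--         hp[h] = hp.get(h, 0) + 1
--         ips.add(a.get('attacker_ip', ''))
--     return {
--         'total': len(attacks),
--         'critical': sev.get('CRITICAL', 0),
--         'high': sev.get('HIGH', 0),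
--         'ssh': hp.get('SSH', 0),
--         'web': hp.get('WEB', 0),
--         'unique_ips': len(ips),
--         'medium': sev.get('MEDIUM', 0),
--         'low': sev.get('LOW', 0),
--     }
-- ===== Notes on version B (the rewrite author's own statement) =====
-- stated objective: alternative
-- what changed: Replaces six separate filtered scans of the attack list with a single pass that builds severity/honeypot frequency tables and an IP set, then reads each count by table lookup.
import Mathlib
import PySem

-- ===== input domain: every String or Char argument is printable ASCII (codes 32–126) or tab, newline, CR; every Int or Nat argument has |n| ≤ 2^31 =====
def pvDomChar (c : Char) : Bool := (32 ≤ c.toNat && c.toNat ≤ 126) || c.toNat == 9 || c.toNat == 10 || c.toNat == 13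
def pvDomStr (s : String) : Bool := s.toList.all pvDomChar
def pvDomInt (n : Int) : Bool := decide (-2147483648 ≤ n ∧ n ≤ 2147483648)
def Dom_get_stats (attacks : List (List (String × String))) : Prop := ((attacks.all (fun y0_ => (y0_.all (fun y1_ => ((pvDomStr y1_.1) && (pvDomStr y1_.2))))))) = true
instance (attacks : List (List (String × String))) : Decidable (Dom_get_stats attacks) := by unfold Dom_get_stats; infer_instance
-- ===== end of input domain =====

-- B replaces A's six filtered scans of the list with one pass building frequency tables
-- and an IP set, then reads each count by table lookup (objective: alternative, one pass).

-- ===== PORT A =====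
def get_stats (attacks : List (List (String × String))) : List (String × Int) :=
  let total : Int := attacks.length
  let critical : Int := (attacks.filter (fun a => (PySem.Dict.mk a).get? "severity" == some "CRITICAL")).length
  let high : Int := (attacks.filter (fun a => (PySem.Dict.mk a).get? "severity" == some "HIGH")).length
  let ssh : Int := (attacks.filter (fun a => (PySem.Dict.mk a).get? "honeypot" == some "SSH")).length
  let web : Int := (attacks.filter (fun a => (PySem.Dict.mk a).get? "honeypot" == some "WEB")).length
  let unique_ips : Int := (PySem.Set.ofList (attacks.map (fun a => (PySem.Dict.mk a).getD "attacker_ip" ""))).length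
  [("total", total), ("critical", critical), ("high", high), ("ssh", ssh), ("web", web),
   ("unique_ips", unique_ips),
   ("medium", ((attacks.filter (fun a => (PySem.Dict.mk a).get? "severity" == some "MEDIUM")).length : Int)),
   ("low", ((attacks.filter (fun a => (PySem.Dict.mk a).get? "severity" == some "LOW")).length : Int))]

-- ===== PORT B =====
-- the body of B's single for-loop (updates the three accumulators)
def bStep (st : PySem.Dict (Option String) Int × PySem.Dict (Option String) Int × PySem.Set String)
    (a : List (String × String)) :
    PySem.Dict (Option String) Int × PySem.Dict (Option String) Int × PySem.Set String :=
  (st.1.modify ((PySem.Dict.mk a).get? "severity") 0 (· + 1),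
   st.2.1.modify ((PySem.Dict.mk a).get? "honeypot") 0 (· + 1),
   PySem.Set.add st.2.2 ((PySem.Dict.mk a).getD "attacker_ip" ""))

def get_stats_alt (attacks : List (List (String × String))) : List (String × Int) :=
  let st := attacks.foldl bStep (PySem.Dict.empty, PySem.Dict.empty, PySem.Set.empty)
  [("total", (attacks.length : Int)),
   ("critical", st.1.getD (some "CRITICAL") 0),
   ("high", st.1.getD (some "HIGH") 0),
   ("ssh", st.2.1.getD (some "SSH") 0),
   ("web", st.2.1.getD (some "WEB") 0),
   ("unique_ips", (PySem.Set.len st.2.2 : Int)),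
   ("medium", st.1.getD (some "MEDIUM") 0),
   ("low", st.1.getD (some "LOW") 0)]

-- ===== PRECONDITION & SPEC =====
def Spec_get_stats (attacks : List (List (String × String))) (out : List (String × Int)) : Prop := out = get_stats_alt attacks
instance (attacks : List (List (String × String))) (out : List (String × Int)) : Decidable (Spec_get_stats attacks out) := by unfold Spec_get_stats; infer_instance

-- ===== CLAIM (what is proved, stated in full; the proofs are below) =====
def Claim_equal_get_stats : Prop := ∀ (attacks : List (List (String × String))), Dom_get_stats attacks → Spec_get_stats attacks (get_stats attacks)

-- ===== LEMMAS AND PROOFS =====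

-- B's loop with three independent accumulators is three separate folds
theorem foldl_bStep (l : List (List (String × String)))
    (d1 d2 : PySem.Dict (Option String) Int) (s : PySem.Set String) :
    l.foldl bStep (d1, d2, s)
      = (l.foldl (fun d a => PySem.Dict.modify d ((PySem.Dict.mk a).get? "severity") 0 (· + 1)) d1,
         l.foldl (fun d a => PySem.Dict.modify d ((PySem.Dict.mk a).get? "honeypot") 0 (· + 1)) d2,
         l.foldl (fun t a => PySem.Set.add t ((PySem.Dict.mk a).getD "attacker_ip" "")) s) := by
  induction l generalizing d1 d2 s with
  | nil => rfl
  | cons x t ih => simp [List.foldl_cons, bStep, ih]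

-- a fold that counts key a is Counter(map key attacks)
theorem counter_key_foldl {α κ : Type} [BEq κ] (l : List α) (key : α → κ) :
    l.foldl (fun d a => PySem.Dict.modify d (key a) 0 (· + 1)) PySem.Dict.empty
      = PySem.Dict.counter (l.map key) := by
  rw [PySem.Dict.counter_eq_foldl, List.foldl_map]

theorem count_map_eq_filter_length {α κ : Type} [BEq κ] (l : List α) (key : α → κ) (v : κ) :
    ((l.map key).count v : Int) = ((l.filter (fun a => key a == v)).length : Int) := by
  induction l with
  | nil => rfl
  | cons x t ih =>
      simp only [List.map_cons, List.count_cons, List.filter_cons]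
      by_cases h : key x == v
      · simp [h] at *; omega
      · simp [h] at *; omega

theorem set_foldl_add {α κ : Type} [BEq κ] (l : List α) (key : α → κ) :
    l.foldl (fun s a => PySem.Set.add s (key a)) PySem.Set.empty
      = PySem.Set.ofList (l.map key) := by
  rw [PySem.Set.ofList_eq_foldl, List.foldl_map]; rfl

-- ===== VERDICT (by name: the statement is the Claim_ definition above) =====
theorem get_stats_spec : Claim_equal_get_stats := by
  intro attacks _
  unfold Spec_get_stats get_stats get_stats_alt
  simp only [foldl_bStep, counter_key_foldl, set_foldl_add,
    PySem.Dict.getD_counter, PySem.Set.len, count_map_eq_filter_length]
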